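-- pv_equiv track=rewrite | github.com/jiyi27/work-mcp | src/work_assistant_mcp/tools/jira/service.py | _find_transition
-- ===== SOURCE A (Python) =====
-- from typing import Any
--
-- def _find_transition(
--     transitions: list[dict[str, Any]], preferred_names: tuple[str, ...]
-- ) -> dict[str, Any] | None:
--     for name in preferred_names:
--         for item in transitions:
--             transition_name = item.get("name")
--             if isinstance(transition_name, str) and transition_name.lower() == name.lower():
--                 return item
--     return None
-- ===== SOURCE B (Python) =====
-- from typing import Any
--
-- def _find_transition(
--     transitions: list[dict[str, Any]], preferred_names: tuple[str, ...]
-- ) -> dict[str, Any] | None: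
--     index: dict[str, dict[str, Any]] = {}
--     for item in transitions:
--         name = item.get("name")
--         if isinstance(name, str):
--             key = name.lower()
--             if key not in index:
--                 index[key] = item
--     for name in preferred_names:
--         hit = index.get(name.lower())
--         if hit is not None:
--             return hit
--     return None
-- ===== Notes on version B (the rewrite author's own statement) =====
-- stated objective: faster
-- what changed: B builds a lowercased-name -> first-transition index in one pass and then probes it once per preferred name, replacing A's nested rescan of transitions for every preferred name.
import Mathlib
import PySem

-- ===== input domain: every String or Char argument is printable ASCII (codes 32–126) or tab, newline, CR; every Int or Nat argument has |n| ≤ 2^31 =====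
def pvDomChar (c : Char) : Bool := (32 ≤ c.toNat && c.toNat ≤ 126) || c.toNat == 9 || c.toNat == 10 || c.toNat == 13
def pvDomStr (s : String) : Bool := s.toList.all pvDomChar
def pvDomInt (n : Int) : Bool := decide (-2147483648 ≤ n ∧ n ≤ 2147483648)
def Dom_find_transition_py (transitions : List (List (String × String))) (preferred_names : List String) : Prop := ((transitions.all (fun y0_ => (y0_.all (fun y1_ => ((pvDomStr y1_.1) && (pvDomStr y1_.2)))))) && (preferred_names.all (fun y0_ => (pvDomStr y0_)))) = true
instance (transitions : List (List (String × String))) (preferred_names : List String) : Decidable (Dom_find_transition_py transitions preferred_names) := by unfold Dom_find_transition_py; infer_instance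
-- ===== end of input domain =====

-- B replaces A's nested rescan by a one-pass index over transitions plus one lookup per preferred name (return value only; no mutation).

-- ===== PORT A =====
-- inner loop of A: scan transitions for the first item whose "name" (a string here by the type convention) lowercases to name.lower()
def pvAScan (transitions : List (List (String × String))) (name : String) : Option (List (String × String)) :=
  match transitions with
  | [] => none
  | item :: rest =>
    match (PySem.Dict.mk item).get? "name" with
    | some tn =>
        if PySem.Str.lower tn = PySem.Str.lower name then some item else pvAScan rest name
    | none => pvAScan rest name

def find_transition_py (transitions : List (List (String × String))) (preferred_names : List String) : Option (List (String × String)) :=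
  match preferred_names with
  | [] => none
  | name :: rest =>
    match pvAScan transitions name with
    | some item => some item
    | none => find_transition_py transitions rest

-- ===== PORT B =====
-- one pass: index by lowercased name, first occurrence wins
def pvBIndex (transitions : List (List (String × String))) : PySem.Dict String (List (String × String)) :=
  transitions.foldl (fun d item =>
    match (PySem.Dict.mk item).get? "name" with
    | some n =>
        let key := PySem.Str.lower n
        if d.contains key then d else d.insert key item
    | none => d) PySem.Dict.empty

def pvBLookup (idx : PySem.Dict String (List (String × String))) (names : List String) : Option (List (String × String)) :=
  match names with
  | [] => none
  | name :: rest =>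
    match idx.get? (PySem.Str.lower name) with
    | some item => some item
    | none => pvBLookup idx rest

def find_transition_py_alt (transitions : List (List (String × String))) (preferred_names : List String) : Option (List (String × String)) :=
  pvBLookup (pvBIndex transitions) preferred_names

-- ===== PRECONDITION & SPEC =====
def Spec_find_transition_py (transitions : List (List (String × String))) (preferred_names : List String) (out : Option (List (String × String))) : Prop := out = find_transition_py_alt transitions preferred_names
instance (transitions : List (List (String × String))) (preferred_names : List String) (out : Option (List (String × String))) : Decidable (Spec_find_transition_py transitions preferred_names out) := by unfold Spec_find_transition_py; infer_instance

-- ===== CLAIM (what is proved, stated in full; the proofs are below) =====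
def Claim_equal_find_transition_py : Prop := ∀ (transitions : List (List (String × String))) (preferred_names : List String), Dom_find_transition_py transitions preferred_names → Spec_find_transition_py transitions preferred_names (find_transition_py transitions preferred_names)

-- ===== LEMMAS AND PROOFS =====

-- A's inner scan, keyed by the already-lowercased name
def pvKScan (transitions : List (List (String × String))) (k : String) : Option (List (String × String)) :=
  match transitions with
  | [] => none
  | item :: rest =>
    match (PySem.Dict.mk item).get? "name" with
    | some tn => if PySem.Str.lower tn = k then some item else pvKScan rest k
    | none => pvKScan rest k

theorem pvAScan_eq_kScan (transitions : List (List (String × String))) (name : String) :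
    pvAScan transitions name = pvKScan transitions (PySem.Str.lower name) := by
  induction transitions with
  | nil => rfl
  | cons item rest ih =>
    simp only [pvAScan, pvKScan, ih]

theorem pvBIndex_get?_foldl (transitions : List (List (String × String)))
    (d : PySem.Dict String (List (String × String))) (k : String) :
    (transitions.foldl (fun d item =>
      match (PySem.Dict.mk item).get? "name" with
      | some n =>
          let key := PySem.Str.lower n
          if d.contains key then d else d.insert key item
      | none => d) d).get? k = (d.get? k).or (pvKScan transitions k) := by
  induction transitions generalizing d with
  | nil => simp [pvKScan]
  | cons item rest ih =>
    simp only [List.foldl_cons, ih, pvKScan]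
    cases hn : (PySem.Dict.mk item).get? "name" with
    | none => rfl
    | some n =>
      simp only
      by_cases hk : PySem.Str.lower n = k
      · subst hk
        by_cases hc : d.contains (PySem.Str.lower n)
        · simp only [hc, if_true]
          have : (d.get? (PySem.Str.lower n)).isSome := by
            rw [← PySem.Dict.contains_eq_isSome_get?, hc]
          cases hg : d.get? (PySem.Str.lower n) with
          | none => rw [hg] at this; simp at this
          | some v => simp [Option.or]
        · simp only [hc, if_false, Bool.false_eq_true, PySem.Dict.get?_insert]
          have hg : d.get? (PySem.Str.lower n) = none := by
            rw [PySem.Dict.get?_eq_none_iff_contains]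
            simpa using hc
          simp [hg, Option.or]
      · by_cases hc : d.contains (PySem.Str.lower n)
        · simp [hc, hk]
        · simp [hc, PySem.Dict.get?_insert, Ne.symm hk, hk]

theorem pvBIndex_get? (transitions : List (List (String × String))) (k : String) :
    (pvBIndex transitions).get? k = pvKScan transitions k := by
  unfold pvBIndex
  rw [pvBIndex_get?_foldl]
  simp [Option.or]

-- ===== VERDICT (by name: the statement is the Claim_ definition above) =====
theorem find_transition_py_spec : Claim_equal_find_transition_py := by
  intro transitions preferred_names hdom
  unfold Spec_find_transition_py find_transition_py_alt
  clear hdom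
  induction preferred_names with
  | nil => rfl
  | cons name rest ih =>
    simp only [find_transition_py, pvBLookup, pvAScan_eq_kScan, pvBIndex_get?, ih]
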